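-- pv_equiv track=rewrite | github.com/seongikjin227-jpg/migration-main | migration-main/app/services/binding_service.py | _normalize_param_name
-- ===== SOURCE A (Python) =====
-- def _normalize_param_name(token: str) -> str:
--     cleaned = token.strip()
--     if not cleaned:
--         return ""
--     for splitter in [",", " ", "?", ":", "=", "!", ">", "<", "+", "-", "*", "/", ")", "("]:
--         if splitter in cleaned:
--             cleaned = cleaned.split(splitter)[0]
--     return cleaned.strip().split(".")[-1]
-- ===== SOURCE B (Python) =====
-- _DELIMS = {",", " ", "?", ":", "=", "!", ">", "<", "+", "-", "*", "/", ")", "("}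
--
-- def _normalize_param_name(token: str) -> str:
--     # Single left-to-right scan: cut at the earliest delimiter instead of 14 split passes.
--     cleaned = token.strip()
--     if not cleaned:
--         return ""
--     prefix = cleaned
--     for i, ch in enumerate(cleaned):
--         if ch in _DELIMS:
--             prefix = cleaned[:i]
--             break
--     return prefix.strip().split(".")[-1]
-- ===== Notes on version B (the rewrite author's own statement) =====
-- stated objective: alternative
-- what changed: Replaces the 14 per-delimiter cut-at-first-occurrence passes with a single left-to-right scan that cuts the string at the earliest delimiter, using one set-membership test per character.
import Mathlib
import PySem

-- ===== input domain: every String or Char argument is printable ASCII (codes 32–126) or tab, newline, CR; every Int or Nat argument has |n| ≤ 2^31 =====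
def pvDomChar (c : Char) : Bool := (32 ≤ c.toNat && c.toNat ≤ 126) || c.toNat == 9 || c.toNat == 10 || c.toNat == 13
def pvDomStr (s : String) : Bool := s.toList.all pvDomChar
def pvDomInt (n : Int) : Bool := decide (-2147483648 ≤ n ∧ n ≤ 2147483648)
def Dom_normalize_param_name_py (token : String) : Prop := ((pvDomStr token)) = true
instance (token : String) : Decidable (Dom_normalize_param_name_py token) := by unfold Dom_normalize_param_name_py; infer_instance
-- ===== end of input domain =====

-- B replaces A's 14 per-delimiter split passes with one left-to-right scan that cuts at the earliest delimiter.

-- ===== PORT A =====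
-- literal transliteration of A: strip, empty check, then for each splitter in the
-- fixed list, 'if splitter in cleaned: cleaned = cleaned.split(splitter)[0]',
-- finally 'cleaned.strip().split(".")[-1]'.
def normalize_param_name_py (token : String) : String :=
  let cleaned := (PySem.Str.strip token).toList
  if cleaned = [] then ""
  else
    let cleaned2 := [',', ' ', '?', ':', '=', '!', '>', '<', '+', '-', '*', '/', ')', '('].foldl
      (fun s d =>
        if PySem.Chars.isIn [d] s then PySem.List.pyGetD (PySem.Chars.splitOn s [d]) 0 [] else s)
      cleaned
    String.ofList (PySem.List.pyGetD (PySem.Chars.splitOn (PySem.Chars.strip cleaned2) ['.']) (-1) [])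

-- ===== PORT B =====
def pvDelimSet : PySem.Set Char :=
  PySem.Set.ofList [',', ' ', '?', ':', '=', '!', '>', '<', '+', '-', '*', '/', ')', '(']

-- B's loop: walk the characters, keeping them until the first delimiter (the break).
def pvScanPrefix : List Char → List Char
  | [] => []
  | c :: rest => if PySem.Set.contains pvDelimSet c then [] else c :: pvScanPrefix rest

def normalize_param_name_py_alt (token : String) : String :=
  let cleaned := (PySem.Str.strip token).toList
  if cleaned = [] then ""
  else
    let pre := pvScanPrefix cleaned
    String.ofList (PySem.List.pyGetD (PySem.Chars.splitOn (PySem.Chars.strip pre) ['.']) (-1) [])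

-- ===== PRECONDITION & SPEC =====
def Spec_normalize_param_name_py (token : String) (out : String) : Prop := out = normalize_param_name_py_alt token
instance (token : String) (out : String) : Decidable (Spec_normalize_param_name_py token out) := by unfold Spec_normalize_param_name_py; infer_instance

-- ===== CLAIM (what is proved, stated in full; the proofs are below) =====
def Claim_equal_normalize_param_name_py : Prop := ∀ (token : String), Dom_normalize_param_name_py token → Spec_normalize_param_name_py token (normalize_param_name_py token)

-- ===== LEMMAS AND PROOFS =====

-- the first piece splitOn.go produces is the bottom of the accumulator once one is pushed
lemma pv_go_headD_acc (sep : List Char) (fuel : Nat) :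
    ∀ (l cur : List Char) (x : List Char) (accs : List (List Char)),
    (PySem.Chars.splitOn.go sep fuel l cur (accs ++ [x])).headD [] = x := by
  induction fuel with
  | zero =>
      intro l cur x accs
      rw [PySem.Chars.splitOn.go.eq_def]
      simp
  | succ fuel ih =>
      intro l cur x accs
      rw [PySem.Chars.splitOn.go.eq_def]
      cases l with
      | nil => simp
      | cons c rest =>
          by_cases h : sep.isPrefixOf (c :: rest) = true
          · simp only [h, if_true]
            have := ih (List.drop sep.length (c :: rest)) [] x (cur.reverse :: accs)
            simpa using this
          · simp only [h]
            exact ih rest (c :: cur) x accs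

-- the first piece of a single-character split is the longest prefix avoiding that character
lemma pv_go_first (d : Char) (fuel : Nat) :
    ∀ (l cur : List Char), l.length ≤ fuel →
    (PySem.Chars.splitOn.go [d] fuel l cur []).headD [] =
      cur.reverse ++ l.takeWhile (· != d) := by
  induction fuel with
  | zero =>
      intro l cur h
      have : l = [] := List.eq_nil_of_length_eq_zero (Nat.le_zero.mp h)
      subst this
      rw [PySem.Chars.splitOn.go.eq_def]; simp
  | succ fuel ih =>
      intro l cur h
      rw [PySem.Chars.splitOn.go.eq_def]
      cases l with
      | nil => simp
      | cons c rest =>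
          by_cases hd : d = c
          · subst hd
            have hpre : [d].isPrefixOf (d :: rest) = true := by simp [List.isPrefixOf]
            simp only [hpre, if_true]
            have hacc := pv_go_headD_acc [d] fuel (List.drop [d].length (d :: rest)) [] cur.reverse []
            simp only [List.nil_append] at hacc
            rw [hacc]
            simp
          · have hpre : [d].isPrefixOf (c :: rest) = false := by
              have hdc : (d == c) = false := beq_eq_false_iff_ne.mpr hd
              simp [List.isPrefixOf, hdc]
            simp only [hpre, Bool.false_eq_true, if_false]
            rw [ih rest (c :: cur) (by simpa using Nat.succ_le_succ_iff.mp h)]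
            have hcd : (c != d) = true := by
              simp [bne_iff_ne]
              intro hc
              exact hd hc.symm
            simp [hcd]

lemma pv_pyGetD_zero_headD (xs : List (List Char)) :
    PySem.List.pyGetD xs 0 [] = xs.headD [] := by
  cases xs <;> simp [PySem.List.pyGetD_zero]

lemma pv_splitOn_head (s : List Char) (d : Char) :
    PySem.List.pyGetD (PySem.Chars.splitOn s [d]) 0 [] = s.takeWhile (· != d) := by
  rw [pv_pyGetD_zero_headD]
  have := pv_go_first d (s.length + 1) s [] (by omega)
  simpa [PySem.Chars.splitOn] using this

lemma pv_takeWhile_of_not_isIn (s : List Char) (d : Char)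
    (h : PySem.Chars.isIn [d] s = false) : s.takeWhile (· != d) = s := by
  have hnot : ¬ ([d] <:+: s) := (PySem.Chars.isIn_eq_false_iff [d] s).mp h
  apply List.takeWhile_eq_self_iff.mpr
  intro a ha
  simp only [bne_iff_ne, ne_eq]
  rintro rfl
  obtain ⟨p, t, rfl⟩ := List.append_of_mem ha
  exact hnot ⟨p, t, by simp⟩

-- A's fold of per-delimiter cuts is the single scan: prefix before the first delimiter
lemma pv_foldl_eq_takeWhile (ds : List Char) :
    ∀ s : List Char,
    ds.foldl (fun s d =>
        if PySem.Chars.isIn [d] s then PySem.List.pyGetD (PySem.Chars.splitOn s [d]) 0 [] else s) s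
      = s.takeWhile (fun c => !ds.contains c) := by
  induction ds with
  | nil =>
      intro s
      simp only [List.foldl_nil, List.contains_eq_mem]
      exact (List.takeWhile_eq_self_iff.mpr (fun _ _ => by simp)).symm
  | cons d ds ih =>
      intro s
      have hstep :
          (if PySem.Chars.isIn [d] s then PySem.List.pyGetD (PySem.Chars.splitOn s [d]) 0 [] else s)
            = s.takeWhile (· != d) := by
        by_cases h : PySem.Chars.isIn [d] s = true
        · simp [h, pv_splitOn_head]
        · have h' : PySem.Chars.isIn [d] s = false := by simpa using h
          simp [h', pv_takeWhile_of_not_isIn s d h']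
      rw [List.foldl_cons, hstep, ih, List.takeWhile_takeWhile]
      congr 1
      funext a
      simp only [List.contains_cons, Bool.not_or]
      by_cases hda : a = d
      · subst hda; simp
      · cases hds : ds.contains a <;> simp [hda, bne_iff_ne]

lemma pv_scanPrefix_eq_takeWhile (s : List Char) :
    pvScanPrefix s = s.takeWhile (fun c => !PySem.Set.contains pvDelimSet c) := by
  induction s with
  | nil => rfl
  | cons c rest ih =>
      rw [pvScanPrefix, List.takeWhile_cons, ih]
      cases h : PySem.Set.contains pvDelimSet c <;> simp

-- ===== VERDICT (by name: the statement is the Claim_ definition above) =====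
theorem normalize_param_name_py_spec : Claim_equal_normalize_param_name_py := by
  intro token _
  unfold Spec_normalize_param_name_py normalize_param_name_py normalize_param_name_py_alt
  by_cases h : (PySem.Str.strip token).toList = []
  · simp [h]
  · simp only [h, if_false]
    have hset : pvDelimSet = [',', ' ', '?', ':', '=', '!', '>', '<', '+', '-', '*', '/', ')', '('] := by decide
    have hXY : ([',', ' ', '?', ':', '=', '!', '>', '<', '+', '-', '*', '/', ')', '('].foldl
        (fun s d =>
          if PySem.Chars.isIn [d] s then PySem.List.pyGetD (PySem.Chars.splitOn s [d]) 0 [] else s)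
        (PySem.Str.strip token).toList) = pvScanPrefix (PySem.Str.strip token).toList := by
      rw [pv_foldl_eq_takeWhile, pv_scanPrefix_eq_takeWhile]
      simp only [hset, PySem.Set.contains_eq_listContains]
    rw [hXY]
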